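-- pv_equiv track=rewrite | github.com/humemai/humemdb | src/humemdb/cypher.py | _tokenize_boolean_expression
-- ===== SOURCE A (Python) =====
-- def _tokenize_boolean_expression(text: str) -> list[str]:
--     """Tokenize a WHERE boolean expression while respecting quoted strings."""
--
--     tokens: list[str] = []
--     current: list[str] = []
--     in_string = False
--     escape = False
--
--     for character in text:
--         if escape:
--             current.append(character)
--             escape = False
--             continue
--
--         if character == "\\":
--             current.append(character)
--             escape = True
--             continue
--
--         if character == "'":
--             current.append(character)
--             in_string = not in_string
--             continue
--
--         if not in_string and character in "()":
--             token = "".join(current).strip()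
--             if token:
--                 tokens.append(token)
--             tokens.append(character)
--             current = []
--             continue
--
--         if not in_string and character.isspace():
--             token = "".join(current).strip()
--             if token:
--                 tokens.append(token)
--                 current = []
--             continue
--
--         current.append(character)
--
--     final_token = "".join(current).strip()
--     if in_string:
--         raise ValueError("HumemCypher v0 found an unterminated string literal.")
--     if final_token:
--         tokens.append(final_token)
--     return tokens
-- ===== SOURCE B (Python) =====
-- def _tokenize_boolean_expression(text: str) -> list[str]:
--     """Tokenize a WHERE boolean expression while respecting quoted strings.
--
--     Recursive-descent scanner: consumes an escaped pair or a whole quoted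
--     string literal in one step instead of tracking escape/in-string flags.
--     """
--     tokens: list[str] = []
--     buf: list[str] = []
--
--     def flush() -> None:
--         token = "".join(buf).strip()
--         buf.clear()
--         if token:
--             tokens.append(token)
--
--     i = 0
--     n = len(text)
--     while i < n:
--         c = text[i]
--         if c == "\\":
--             buf.append(text[i:i + 2])
--             i += 2
--         elif c == "'":
--             j = _scan_string(text, i + 1)
--             if j is None:
--                 raise ValueError("HumemCypher v0 found an unterminated string literal.")
--             buf.append(text[i:j + 1])
--             i = j + 1
--         elif c in "()":
--             flush()
--             tokens.append(c)
--             i += 1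
--         elif c.isspace():
--             flush()
--             i += 1
--         else:
--             buf.append(c)
--             i += 1
--     flush()
--     return tokens
--
--
-- def _scan_string(text: str, start: int):
--     """Index of the closing quote of a string opened just before ``start``."""
--     i = start
--     n = len(text)
--     while i < n:
--         if text[i] == "\\":
--             i += 2
--         elif text[i] == "'":
--             return i
--         else:
--             i += 1
--     return None
-- ===== Notes on version B (the rewrite author's own statement) =====
-- stated objective: alternative
-- what changed: Replaced A's per-character state machine with escape/in-string boolean flags by a recursive-descent scanner that consumes an escaped pair or an entire quoted string literal in one step via a dedicated _scan_string helper; the in_string/escape flags disappear entirely.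
import Mathlib
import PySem

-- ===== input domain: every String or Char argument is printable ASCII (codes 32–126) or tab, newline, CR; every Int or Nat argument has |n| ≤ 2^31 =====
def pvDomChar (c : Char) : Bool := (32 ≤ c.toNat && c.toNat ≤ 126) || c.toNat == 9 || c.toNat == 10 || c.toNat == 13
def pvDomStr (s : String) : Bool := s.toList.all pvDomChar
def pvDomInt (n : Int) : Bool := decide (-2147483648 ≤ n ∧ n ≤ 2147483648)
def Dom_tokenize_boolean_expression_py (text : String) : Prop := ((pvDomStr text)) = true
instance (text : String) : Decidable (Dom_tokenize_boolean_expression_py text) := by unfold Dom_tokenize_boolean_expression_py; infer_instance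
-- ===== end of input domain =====

-- B re-tokenizes with a recursive-descent scanner that consumes an escaped pair or a whole
-- quoted literal in one step, instead of A's per-character escape/in-string flag machine
-- (objective: alternative structure, same cost). Equality of RETURN values is claimed on
-- Pre_ (inputs where A returns; on unterminated string literals both Pythons raise ValueError).

-- ===== PORT A =====
-- A's loop: state = (tokens, current, in_string, escape); on the raising path
-- (in_string still true at the end of the text, Python raises ValueError) the port returns [].
def pvALoop : List Char → List String → List Char → Bool → Bool → List String
  | [], tokens, current, instr, _esc =>
      if instr then []      -- Python: raise ValueError (excluded by Pre_)
      else
        let finalToken := PySem.Chars.strip current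
        if finalToken ≠ [] then tokens ++ [String.mk finalToken] else tokens
  | c :: rest, tokens, current, instr, esc =>
      if esc then pvALoop rest tokens (current ++ [c]) instr false
      else if c = '\\' then pvALoop rest tokens (current ++ [c]) instr true
      else if c = '\'' then pvALoop rest tokens (current ++ [c]) (!instr) esc
      else if !instr && (c = '(' || c = ')') then
        let token := PySem.Chars.strip current
        let tokens' := if token ≠ [] then tokens ++ [String.mk token] else tokens
        pvALoop rest (tokens' ++ [String.mk [c]]) [] instr esc
      else if !instr && PySem.Chars.isspace c then
        let token := PySem.Chars.strip current
        if token ≠ [] then pvALoop rest (tokens ++ [String.mk token]) [] instr esc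
        else pvALoop rest tokens current instr esc
      else pvALoop rest tokens (current ++ [c]) instr esc

def tokenize_boolean_expression_py (text : String) : List String :=
  pvALoop text.toList [] [] false false

-- ===== PORT B =====
-- B's helper _scan_string: index search rendered on the remaining character list;
-- returns (consumed chunk up to and including the closing quote, remainder), none = no closing quote.
def pvScanString : List Char → Option (List Char × List Char)
  | [] => none
  | c :: rest =>
      if c = '\\' then
        match rest with
        | [] => none
        | d :: rest' =>
          match pvScanString rest' with
          | none => none
          | some (ch, r) => some (c :: d :: ch, r)
      else if c = '\'' then some ([c], rest)
      else
        match pvScanString rest with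
        | none => none
        | some (ch, r) => some (c :: ch, r)

def pvFlush (buf : List Char) (tokens : List String) : List String :=
  let token := PySem.Chars.strip buf
  if token ≠ [] then tokens ++ [String.mk token] else tokens

-- B's while loop over the remaining characters; the Nat fuel (one unit per iteration,
-- initialised to the text length, which bounds the iteration count) only makes the
-- recursion structural — it never alters the computation.
def pvBLoopF : Nat → List Char → List Char → List String → List String
  | _, [], buf, tokens => pvFlush buf tokens
  | 0, _ :: _, buf, tokens => pvFlush buf tokens    -- never reached: fuel ≥ remaining length
  | fuel + 1, c :: rest, buf, tokens =>
      if c = '\\' then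
        match rest with
        | [] => pvBLoopF fuel [] (buf ++ [c]) tokens            -- text[i:i+2] is just "\"
        | d :: rest' => pvBLoopF fuel rest' (buf ++ [c, d]) tokens
      else if c = '\'' then
        match pvScanString rest with
        | none => []                                            -- Python: raise ValueError (excluded by Pre_)
        | some (ch, r) => pvBLoopF fuel r (buf ++ c :: ch) tokens
      else if c = '(' || c = ')' then
        pvBLoopF fuel rest [] (pvFlush buf tokens ++ [String.mk [c]])
      else if PySem.Chars.isspace c then
        pvBLoopF fuel rest [] (pvFlush buf tokens)
      else pvBLoopF fuel rest (buf ++ [c]) tokens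

def pvBLoop (l buf : List Char) (tokens : List String) : List String :=
  pvBLoopF l.length l buf tokens

def tokenize_boolean_expression_py_alt (text : String) : List String :=
  pvBLoop text.toList [] []

-- ===== PRECONDITION & SPEC =====
-- Pre_ excludes exactly the inputs containing an unterminated quoted string literal:
-- there Python A raises ValueError (and B raises the same ValueError), so no value is claimed.
def pvQuotesClosed : List Char → Bool → Bool
  | [], instr => !instr
  | c :: rest, instr =>
      if c = '\\' then
        match rest with
        | [] => !instr
        | _ :: rest' => pvQuotesClosed rest' instr
      else if c = '\'' then pvQuotesClosed rest (!instr)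
      else pvQuotesClosed rest instr

def Pre_tokenize_boolean_expression_py (text : String) : Prop :=
  pvQuotesClosed text.toList false = true
instance (text : String) : Decidable (Pre_tokenize_boolean_expression_py text) := by
  unfold Pre_tokenize_boolean_expression_py; infer_instance

def pvWitness_tokenize_boolean_expression_py : String := "'a'"

def Spec_tokenize_boolean_expression_py (text : String) (out : List String) : Prop := out = tokenize_boolean_expression_py_alt text
instance (text : String) (out : List String) : Decidable (Spec_tokenize_boolean_expression_py text out) := by unfold Spec_tokenize_boolean_expression_py; infer_instance

-- ===== CLAIM (what is proved, stated in full; the proofs are below) =====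
def Claim_equal_tokenize_boolean_expression_py : Prop := ∀ (text : String), Dom_tokenize_boolean_expression_py text → Pre_tokenize_boolean_expression_py text → Spec_tokenize_boolean_expression_py text (tokenize_boolean_expression_py text)

-- ===== LEMMAS AND PROOFS =====

-- step lemmas unfolding one iteration of each port's loop

theorem pv_scan_nil : pvScanString [] = none := rfl

theorem pv_scan_backslash_nil (c : Char) (h : c = '\\') : pvScanString [c] = none := by
  unfold pvScanString; simp [h]

theorem pv_scan_backslash (c d : Char) (rest : List Char) (h : c = '\\') :
    pvScanString (c :: d :: rest) =
      match pvScanString rest with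
      | none => none
      | some (ch, r) => some (c :: d :: ch, r) := by
  conv_lhs => unfold pvScanString
  simp [h]

theorem pv_scan_quote (c : Char) (rest : List Char) (h : c = '\'') :
    pvScanString (c :: rest) = some ([c], rest) := by
  unfold pvScanString; simp [h]

theorem pv_scan_other (c : Char) (rest : List Char) (h1 : ¬ c = '\\') (h2 : ¬ c = '\'') :
    pvScanString (c :: rest) =
      match pvScanString rest with
      | none => none
      | some (ch, r) => some (c :: ch, r) := by
  conv_lhs => unfold pvScanString
  simp [h1, h2]

theorem pvScanString_length_aux : ∀ (n : ℕ) (l ch r : List Char), l.length ≤ n → pvScanString l = some (ch, r) → r.length < l.length := by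
  intro n
  induction n with
  | zero =>
      intro l ch r hl h
      cases l with
      | nil => simp [pvScanString] at h
      | cons c rest => simp at hl
  | succ n ih =>
      intro l ch r hl h
      cases l with
      | nil => simp [pvScanString] at h
      | cons c rest =>
        unfold pvScanString at h
        split_ifs at h with h1 h2
        · cases rest with
          | nil => simp at h
          | cons d rest' =>
              cases hs : pvScanString rest' with
              | none => simp [hs] at h
              | some p =>
                  obtain ⟨ch', r'⟩ := p
                  simp [hs] at h
                  have hlen := ih rest' ch' r' (by simp at hl ⊢; omega) hs
                  simp [← h.2]
                  omega
        · simp at h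
          simp [← h.2]
        · cases hs : pvScanString rest with
          | none => simp [hs] at h
          | some p =>
              obtain ⟨ch', r'⟩ := p
              simp [hs] at h
              have hlen := ih rest ch' r' (by simp at hl; omega) hs
              simp [← h.2]
              omega

theorem pvScanString_length (l ch r : List Char) (h : pvScanString l = some (ch, r)) : r.length < l.length :=
  pvScanString_length_aux l.length l ch r le_rfl h

-- any fuel at least the remaining length computes the same result
theorem pvBLoopF_fuel : ∀ (m n : ℕ) (l buf : List Char) (tokens : List String),
    l.length ≤ m → l.length ≤ n → pvBLoopF m l buf tokens = pvBLoopF n l buf tokens := by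
  intro m
  induction m with
  | zero =>
      intro n l buf tokens hm hn
      cases l with
      | nil => cases n <;> rfl
      | cons c rest => simp at hm
  | succ m ih =>
      intro n l buf tokens hm hn
      cases l with
      | nil => cases n <;> rfl
      | cons c rest =>
        cases n with
        | zero => simp at hn
        | succ n =>
          simp only [List.length_cons, Nat.add_le_add_iff_right] at hm hn
          conv_lhs => unfold pvBLoopF
          conv_rhs => unfold pvBLoopF
          by_cases hc1 : c = '\\'
          · cases rest with
            | nil =>
                simp only [hc1, if_pos rfl]
                exact ih n [] _ _ (by simp) (by simp)
            | cons d rest' =>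
                simp only [hc1, if_pos rfl]
                exact ih n rest' _ _ (by simp at hm; omega) (by simp at hn; omega)
          · by_cases hc2 : c = '\''
            · simp only [hc1, if_neg hc1, hc2, if_pos hc2]
              cases hs : pvScanString rest with
              | none => simp [hs]
              | some p =>
                  obtain ⟨ch, r⟩ := p
                  have := pvScanString_length rest ch r hs
                  simp only [hs]
                  exact ih n r _ _ (by omega) (by omega)
            · by_cases hc3 : c = '(' ∨ c = ')'
              · have hp : (c = '(' || c = ')') = true := by
                  rcases hc3 with h3 | h3 <;> simp [h3]
                simp only [if_neg hc1, if_neg hc2, hp, if_pos]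
                exact ih n rest _ _ hm hn
              · have hp : (c = '(' || c = ')') = false := by
                  rcases (not_or.mp hc3) with ⟨h3, h4⟩; simp [h3, h4]
                by_cases hc4 : PySem.Chars.isspace c = true
                · simp only [if_neg hc1, if_neg hc2, hp, Bool.false_eq_true, if_false, hc4, if_pos]
                  exact ih n rest _ _ hm hn
                · simp only [if_neg hc1, if_neg hc2, hp, Bool.false_eq_true, if_false, hc4]
                  exact ih n rest _ _ hm hn

theorem pv_bloop_nil (buf : List Char) (tokens : List String) :
    pvBLoop [] buf tokens = pvFlush buf tokens := rfl

theorem pv_bloop_backslash_nil (c : Char) (buf : List Char) (tokens : List String) (h : c = '\\') :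
    pvBLoop [c] buf tokens = pvBLoop [] (buf ++ [c]) tokens := by
  show pvBLoopF (0 + 1) [c] buf tokens = _
  conv_lhs => unfold pvBLoopF
  simp [h]
  rfl

theorem pv_bloop_backslash (c d : Char) (rest buf : List Char) (tokens : List String) (h : c = '\\') :
    pvBLoop (c :: d :: rest) buf tokens = pvBLoop rest (buf ++ [c, d]) tokens := by
  show pvBLoopF (rest.length + 1 + 1) (c :: d :: rest) buf tokens = _
  conv_lhs => unfold pvBLoopF
  simp only [h, if_pos rfl]
  exact pvBLoopF_fuel (rest.length + 1) rest.length rest _ _ (by omega) le_rfl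

theorem pv_bloop_quote (c : Char) (rest buf : List Char) (tokens : List String) (h : c = '\'') :
    pvBLoop (c :: rest) buf tokens =
      match pvScanString rest with
      | none => []
      | some (ch, r) => pvBLoop r (buf ++ c :: ch) tokens := by
  have hne : ¬ c = '\\' := by rw [h]; decide
  show pvBLoopF (rest.length + 1) (c :: rest) buf tokens = _
  conv_lhs => unfold pvBLoopF
  simp only [if_neg hne, h, if_pos rfl]
  cases hs : pvScanString rest with
  | none => simp [hs]
  | some p =>
      obtain ⟨ch, r⟩ := p
      have := pvScanString_length rest ch r hs
      simp only [hs]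
      exact pvBLoopF_fuel rest.length r.length r _ _ (by omega) le_rfl

theorem pv_bloop_paren (c : Char) (rest buf : List Char) (tokens : List String)
    (h3 : c = '(' ∨ c = ')') :
    pvBLoop (c :: rest) buf tokens = pvBLoop rest [] (pvFlush buf tokens ++ [String.mk [c]]) := by
  have hne1 : ¬ c = '\\' := by rcases h3 with h | h <;> rw [h] <;> decide
  have hne2 : ¬ c = '\'' := by rcases h3 with h | h <;> rw [h] <;> decide
  have hp : (c = '(' || c = ')') = true := by rcases h3 with h | h <;> simp [h]
  show pvBLoopF (rest.length + 1) (c :: rest) buf tokens = _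
  conv_lhs => unfold pvBLoopF
  simp only [if_neg hne1, if_neg hne2, hp, if_pos]
  rfl

theorem pv_bloop_space (c : Char) (rest buf : List Char) (tokens : List String)
    (h1 : ¬ c = '\\') (h2 : ¬ c = '\'') (h3 : ¬ c = '(') (h4 : ¬ c = ')')
    (h5 : PySem.Chars.isspace c = true) :
    pvBLoop (c :: rest) buf tokens = pvBLoop rest [] (pvFlush buf tokens) := by
  have hp : (c = '(' || c = ')') = false := by simp [h3, h4]
  show pvBLoopF (rest.length + 1) (c :: rest) buf tokens = _
  conv_lhs => unfold pvBLoopF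
  simp only [if_neg h1, if_neg h2, hp, Bool.false_eq_true, if_false, h5, if_pos]
  rfl

theorem pv_bloop_other (c : Char) (rest buf : List Char) (tokens : List String)
    (h1 : ¬ c = '\\') (h2 : ¬ c = '\'') (h3 : ¬ c = '(') (h4 : ¬ c = ')')
    (h5 : ¬ PySem.Chars.isspace c = true) :
    pvBLoop (c :: rest) buf tokens = pvBLoop rest (buf ++ [c]) tokens := by
  have hp : (c = '(' || c = ')') = false := by simp [h3, h4]
  show pvBLoopF (rest.length + 1) (c :: rest) buf tokens = _
  conv_lhs => unfold pvBLoopF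
  simp only [if_neg h1, if_neg h2, hp, Bool.false_eq_true, if_false, h5, if_false]
  rfl

theorem pv_strip_eq_nil (cs : List Char) (h : PySem.Chars.strip cs = []) :
    ∀ c ∈ cs, PySem.Chars.isspace c = true := by
  simp only [PySem.Chars.strip, PySem.Chars.rstrip, PySem.Chars.lstrip] at h
  rw [List.reverse_eq_nil_iff, List.dropWhile_eq_nil_iff] at h
  intro c hc
  have hsplit := List.takeWhile_append_dropWhile (p := PySem.Chars.isspace) (l := cs)
  rcases List.mem_append.mp (by rw [hsplit]; exact hc) with h1 | h2
  · exact List.mem_takeWhile_imp h1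
  · exact h _ (List.mem_reverse.mpr h2)

-- the invariant carried through the main induction: the current buffer is either empty
-- or contains a non-space character (so A's "if token:" reset and B's unconditional reset agree)
def pvInv (buf : List Char) : Prop := PySem.Chars.strip buf = [] → buf = []

theorem pv_inv_of_nonspace (buf : List Char) (c : Char) (hc : c ∈ buf)
    (hns : PySem.Chars.isspace c = false) : pvInv buf := by
  intro h
  have := pv_strip_eq_nil buf h c hc
  simp [hns] at this

-- string mode: with in_string = true A's flag loop consumes exactly what pvScanString consumes
theorem pv_string_mode : ∀ (n : ℕ) (l : List Char), l.length ≤ n → ∀ buf tokens,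
    pvALoop l tokens buf true false =
      (match pvScanString l with
       | none => []
       | some (ch, r) => pvALoop r tokens (buf ++ ch) false false) := by
  intro n
  induction n with
  | zero =>
      intro l hl buf tokens
      cases l with
      | nil => simp [pvALoop, pv_scan_nil]
      | cons c rest => simp at hl
  | succ n ih =>
      intro l hl buf tokens
      cases l with
      | nil => simp [pvALoop, pv_scan_nil]
      | cons c rest =>
        by_cases hc1 : c = '\\'
        · cases rest with
          | nil =>
              subst hc1
              rw [pv_scan_backslash_nil _ rfl]
              simp [pvALoop]
          | cons d rest' =>
              have hstep : pvALoop (c :: d :: rest') tokens buf true false =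
                  pvALoop rest' tokens (buf ++ [c] ++ [d]) true false := by
                simp [pvALoop, hc1]
              rw [hstep, ih rest' (by simp at hl ⊢; omega) (buf ++ [c] ++ [d]) tokens,
                pv_scan_backslash c d rest' hc1]
              cases hs : pvScanString rest' with
              | none => simp
              | some p =>
                  obtain ⟨ch, r⟩ := p
                  simp
        · by_cases hc2 : c = '\''
          · have hstep : pvALoop (c :: rest) tokens buf true false =
                pvALoop rest tokens (buf ++ [c]) false false := by
              simp [pvALoop, hc1, hc2]
            rw [hstep, pv_scan_quote c rest hc2]
          · have hstep : pvALoop (c :: rest) tokens buf true false =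
                pvALoop rest tokens (buf ++ [c]) true false := by
              simp [pvALoop, hc1, hc2]
            rw [hstep, ih rest (by simp at hl; omega) (buf ++ [c]) tokens,
              pv_scan_other c rest hc1 hc2]
            cases hs : pvScanString rest with
            | none => simp
            | some p =>
                obtain ⟨ch, r⟩ := p
                simp

theorem pv_main : ∀ (n : ℕ) (l : List Char), l.length ≤ n → ∀ buf tokens, pvInv buf →
    pvALoop l tokens buf false false = pvBLoop l buf tokens := by
  intro n
  induction n with
  | zero =>
      intro l hl buf tokens hbuf
      cases l with
      | nil => simp [pvALoop, pv_bloop_nil, pvFlush]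
      | cons c rest => simp at hl
  | succ n ih =>
      intro l hl buf tokens hbuf
      cases l with
      | nil => simp [pvALoop, pv_bloop_nil, pvFlush]
      | cons c rest =>
        have hlrest : rest.length ≤ n := by simp at hl; omega
        by_cases hc1 : c = '\\'
        · cases rest with
          | nil =>
              rw [pv_bloop_backslash_nil c buf tokens hc1, pv_bloop_nil]
              simp [pvALoop, pvFlush, hc1]
          | cons d rest' =>
              have hstep : pvALoop (c :: d :: rest') tokens buf false false =
                  pvALoop rest' tokens (buf ++ [c] ++ [d]) false false := by
                simp [pvALoop, hc1]

              have hinv : pvInv (buf ++ [c] ++ [d]) :=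
                pv_inv_of_nonspace _ c (by simp) (by rw [hc1]; decide)
              rw [hstep, ih rest' (by simp at hl ⊢; omega) (buf ++ [c] ++ [d]) tokens hinv,
                pv_bloop_backslash c d rest' buf tokens hc1]
              simp
        · by_cases hc2 : c = '\''
          · have hstep : pvALoop (c :: rest) tokens buf false false =
                pvALoop rest tokens (buf ++ [c]) true false := by
              simp [pvALoop, hc1, hc2]
            rw [hstep, pv_string_mode rest.length rest le_rfl (buf ++ [c]) tokens,
              pv_bloop_quote c rest buf tokens hc2]
            cases hs : pvScanString rest with
            | none => simp
            | some p =>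
                obtain ⟨ch, r⟩ := p
                have hr : r.length ≤ n := le_of_lt (lt_of_lt_of_le (pvScanString_length rest ch r hs) hlrest)
                have hinv : pvInv (buf ++ [c] ++ ch) :=
                  pv_inv_of_nonspace _ c (by simp) (by rw [hc2]; decide)
                simp only []
                rw [ih r hr (buf ++ [c] ++ ch) tokens hinv]
                simp
          · by_cases hc3 : c = '(' ∨ c = ')'
            · have hstep : pvALoop (c :: rest) tokens buf false false =
                  pvALoop rest (pvFlush buf tokens ++ [String.mk [c]]) [] false false := by
                rcases hc3 with h3 | h3 <;> simp [pvALoop, pvFlush, hc1, hc2, h3]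
              rw [hstep, ih rest hlrest [] _ (by intro _; rfl),
                pv_bloop_paren c rest buf tokens hc3]
            · have hc3a : ¬ c = '(' := fun h => hc3 (Or.inl h)
              have hc3b : ¬ c = ')' := fun h => hc3 (Or.inr h)
              by_cases hc4 : PySem.Chars.isspace c = true
              · rw [pv_bloop_space c rest buf tokens hc1 hc2 hc3a hc3b hc4]
                by_cases ht : PySem.Chars.strip buf = []
                · have hbe : buf = [] := hbuf ht
                  have hstep : pvALoop (c :: rest) tokens buf false false =
                      pvALoop rest tokens buf false false := by
                    simp [pvALoop, hc1, hc2, hc3a, hc3b, hc4, ht]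
                  rw [hstep, hbe, ih rest hlrest [] tokens (by intro _; rfl)]
                  simp [pvFlush, ht, hbe ▸ ht]
                · have hstep : pvALoop (c :: rest) tokens buf false false =
                      pvALoop rest (tokens ++ [String.mk (PySem.Chars.strip buf)]) [] false false := by
                    simp [pvALoop, hc1, hc2, hc3a, hc3b, hc4, ht]
                  rw [hstep, ih rest hlrest [] _ (by intro _; rfl)]
                  simp [pvFlush, ht]
              · have hstep : pvALoop (c :: rest) tokens buf false false =
                    pvALoop rest tokens (buf ++ [c]) false false := by
                  simp [pvALoop, hc1, hc2, hc3a, hc3b, hc4]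
                have hinv : pvInv (buf ++ [c]) :=
                  pv_inv_of_nonspace _ c (by simp) (by simpa using hc4)
                rw [hstep, ih rest hlrest (buf ++ [c]) tokens hinv,
                  pv_bloop_other c rest buf tokens hc1 hc2 hc3a hc3b hc4]

-- ===== VERDICT (by name: the statement is the Claim_ definition above) =====
theorem tokenize_boolean_expression_py_spec : Claim_equal_tokenize_boolean_expression_py := by
  intro text _ _
  unfold Spec_tokenize_boolean_expression_py tokenize_boolean_expression_py tokenize_boolean_expression_py_alt
  exact pv_main text.toList.length text.toList le_rfl [] [] (by intro _; rfl)
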